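-- pv_equiv track=rewrite | github.com/Ricardo-Mochila/University | 1ºSemestre/P1/Python/Ficha_9/Exercicio9_11.py | ocorrencias_case
-- ===== SOURCE A (Python) =====
-- def ocorrencias_case(letra, string, indice):
--     b = 0
--     c = 0
--
--
--
--
--     for i in string:
--         if c >= indice and i == letra:
--             b = b + 1
--         else:
--             c= c+1
--     return b
-- ===== SOURCE B (Python) =====
-- def ocorrencias_case(letra, string, indice):
--     # The loop in A counts occurrences of letra among the characters after the
--     # first max(indice, 0) ones: slice that suffix off and count directly.
--     return list(string[max(indice, 0):]).count(letra)
-- ===== Notes on version B (the rewrite author's own statement) =====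
-- stated objective: simpler
-- what changed: Replaces the two-counter threshold loop with a slice of the suffix after max(indice,0) characters and a direct list .count(), no per-character branching state.
import Mathlib
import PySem

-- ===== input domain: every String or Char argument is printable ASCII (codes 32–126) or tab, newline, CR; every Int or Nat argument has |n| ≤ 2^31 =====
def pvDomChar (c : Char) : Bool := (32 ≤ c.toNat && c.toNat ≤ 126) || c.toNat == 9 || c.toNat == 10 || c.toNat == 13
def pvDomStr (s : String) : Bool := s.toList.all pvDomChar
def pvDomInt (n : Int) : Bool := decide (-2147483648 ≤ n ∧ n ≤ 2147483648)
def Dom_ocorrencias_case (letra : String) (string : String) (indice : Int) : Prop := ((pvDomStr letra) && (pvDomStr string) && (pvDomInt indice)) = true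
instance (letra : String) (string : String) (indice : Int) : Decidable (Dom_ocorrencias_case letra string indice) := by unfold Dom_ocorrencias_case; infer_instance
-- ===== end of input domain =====

-- B replaces A's two-counter threshold loop by slicing off the suffix after
-- max(indice, 0) characters and counting letra in it directly (simpler).

-- ===== PORT A =====
def ocorrencias_case (letra : String) (string : String) (indice : Int) : Int :=
  -- b = 0; c = 0; for i in string: if c >= indice and i == letra: b += 1 else: c += 1; return b
  (string.toList.foldl
    (fun (bc : Int × Int) i =>
      if bc.2 ≥ indice ∧ String.ofList [i] = letra then (bc.1 + 1, bc.2) else (bc.1, bc.2 + 1))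
    (0, 0)).1

-- ===== PORT B =====
def ocorrencias_case_alt (letra : String) (string : String) (indice : Int) : Int :=
  -- return list(string[max(indice, 0):]).count(letra)
  (PySem.List.count ((PySem.List.slice string.toList (some (max indice 0)) none).map
      (fun c => String.ofList [c])) letra : Int)

-- ===== PRECONDITION & SPEC =====
def Spec_ocorrencias_case (letra : String) (string : String) (indice : Int) (out : Int) : Prop := out = ocorrencias_case_alt letra string indice
instance (letra : String) (string : String) (indice : Int) (out : Int) : Decidable (Spec_ocorrencias_case letra string indice out) := by unfold Spec_ocorrencias_case; infer_instance

-- ===== CLAIM (what is proved, stated in full; the proofs are below) =====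
def Claim_equal_ocorrencias_case : Prop := ∀ (letra : String) (string : String) (indice : Int), Dom_ocorrencias_case letra string indice → Spec_ocorrencias_case letra string indice (ocorrencias_case letra string indice)

-- ===== LEMMAS AND PROOFS =====

/-- Invariant of A's loop: starting from counters (b, c), the returned `b`
is `b` plus the number of `letra`-characters after the first
`(indice - c).toNat` remaining characters. -/
theorem ocorrencias_loop_inv (letra : String) (indice : Int) :
    ∀ (l : List Char) (b c : Int),
      (l.foldl
        (fun (bc : Int × Int) i =>
          if bc.2 ≥ indice ∧ String.ofList [i] = letra then (bc.1 + 1, bc.2) else (bc.1, bc.2 + 1))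
        (b, c)).1
      = b + ((l.drop ((indice - c).toNat)).countP (fun i => String.ofList [i] == letra) : Int) := by
  intro l
  induction l with
  | nil => intro b c; simp
  | cons i l ih =>
    intro b c
    rw [List.foldl_cons]
    by_cases hc : indice ≤ c
    · have h0 : (indice - c).toNat = 0 := by omega
      by_cases hp : String.ofList [i] = letra
      · rw [if_pos (show (b, c).2 ≥ indice ∧ String.ofList [i] = letra from ⟨hc, hp⟩)]
        rw [ih]
        simp [h0, hp]
        omega
      · rw [if_neg (show ¬((b, c).2 ≥ indice ∧ String.ofList [i] = letra) by tauto)]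
        rw [ih]
        have h1 : (indice - (c + 1)).toNat = 0 := by omega
        simp [h0, h1, hp]
    · rw [if_neg (show ¬((b, c).2 ≥ indice ∧ String.ofList [i] = letra) by
        simp only [ge_iff_le]; tauto)]
      rw [ih]
      have h2 : (indice - c).toNat = (indice - (c + 1)).toNat + 1 := by omega
      rw [h2, List.drop_succ_cons]

-- ===== VERDICT (by name: the statement is the Claim_ definition above) =====
theorem ocorrencias_case_spec : Claim_equal_ocorrencias_case := by
  intro letra string indice _
  show ocorrencias_case letra string indice = ocorrencias_case_alt letra string indice
  unfold ocorrencias_case ocorrencias_case_alt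
  rw [ocorrencias_loop_inv]
  rw [PySem.List.slice_from string.toList (le_max_right indice 0)]
  have hmax : (max indice 0).toNat = (indice - 0).toNat := by omega
  rw [hmax, PySem.List.count_eq, List.count_eq_countP, List.countP_map]
  simp [Function.comp_def]
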